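-- pv_equiv track=rewrite | github.com/ZeNGrooT147/Vtu_python | vtu_pdf_parser.py | calculate_grade_point
-- ===== SOURCE A (Python) =====
-- VTU_SCHEMES = {
--     "2024": {
--         "grading": {"O": 10, "A+": 9, "A": 8, "B+": 7, "B": 6, "C": 5, "P": 4, "F": 0},
--         "pattern": r"B[A-Z]{4}\d{3}[A-Z]?",
--         "marks_to_grade": {
--             90: "O", 80: "A+", 70: "A", 60: "B+", 55: "B", 50: "C", 40: "P"
--         }
--     },
--     "2022": {
--         "grading": {"O": 10, "A+": 9, "A": 8, "B+": 7, "B": 6, "C": 5, "P": 4, "F": 0},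
--         "pattern": r"B[A-Z]{2}\d{3}[A-Z]?",
--         "marks_to_grade": {
--             90: "O", 80: "A+", 70: "A", 60: "B+", 55: "B", 50: "C", 40: "P"
--         }
--     },
--     "2021": {
--         "grading": {"O": 10, "A+": 9, "A": 8, "B+": 7, "B": 6, "C": 5, "P": 4, "F": 0},
--         "pattern": r"21[A-Z]{2,4}\d{2,3}",
--         "marks_to_grade": {
--             90: "O", 80: "A+", 70: "A", 60: "B+", 55: "B", 50: "C", 40: "P"
--         }
--     },
--     "2018": {
--         "grading": {"S": 10, "A": 9, "B": 8, "C": 7, "D": 6, "E": 5, "F": 0},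
--         "pattern": r"18[A-Z]{2,4}\d{2,3}",
--         "marks_to_grade": {
--             90: "S", 80: "A", 70: "B", 60: "C", 50: "D", 40: "E"
--         }
--     },
--     "2017": {
--         "grading": {"S": 10, "A": 9, "B": 8, "C": 7, "D": 6, "E": 5, "F": 0},
--         "pattern": r"17[A-Z]{2,4}\d{2,3}",
--         "marks_to_grade": {
--             90: "S", 80: "A", 70: "B", 60: "C", 50: "D", 40: "E"
--         }
--     },
--     "2015": {
--         "grading": {"S": 10, "A": 9, "B": 8, "C": 7, "D": 6, "E": 5, "F": 0},
--         "pattern": r"15[A-Z]{2,4}\d{2,3}",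
--         "marks_to_grade": {
--             90: "S", 80: "A", 70: "B", 60: "C", 50: "D", 40: "E"
--         }
--     }
-- }
--
-- def calculate_grade_point(marks, scheme):
--     """Calculate grade point based on marks and VTU scheme"""
--     if scheme not in VTU_SCHEMES:
--         return 0
--
--     marks_to_grade = VTU_SCHEMES[scheme]["marks_to_grade"]
--     grading = VTU_SCHEMES[scheme]["grading"]
--
--     # Find the appropriate grade
--     grade = "F"  # Default to F
--     for threshold, grade_letter in sorted(marks_to_grade.items(), reverse=True):
--         if marks >= threshold:
--             grade = grade_letter
--             break
--
--     # Return grade point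
--     return grading.get(grade, 0)
-- ===== SOURCE B (Python) =====
-- # B: precomputed per-scheme ascending threshold table + hand-written binary search
-- # (bisect_right) instead of A's descending linear scan; same values everywhere.
--
-- _GRADING_NEW = {"O": 10, "A+": 9, "A": 8, "B+": 7, "B": 6, "C": 5, "P": 4, "F": 0}
-- _GRADING_OLD = {"S": 10, "A": 9, "B": 8, "C": 7, "D": 6, "E": 5, "F": 0}
-- _THR_NEW = ([40, 50, 55, 60, 70, 80, 90], ["P", "C", "B", "B+", "A", "A+", "O"])
-- _THR_OLD = ([40, 50, 60, 70, 80, 90], ["E", "D", "C", "B", "A", "S"])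
--
-- _TABLES = {
--     "2024": (_THR_NEW, _GRADING_NEW),
--     "2022": (_THR_NEW, _GRADING_NEW),
--     "2021": (_THR_NEW, _GRADING_NEW),
--     "2018": (_THR_OLD, _GRADING_OLD),
--     "2017": (_THR_OLD, _GRADING_OLD),
--     "2015": (_THR_OLD, _GRADING_OLD),
-- }
--
--
-- def calculate_grade_point(marks, scheme):
--     entry = _TABLES.get(scheme)
--     if entry is None:
--         return 0
--     (thresholds, grades), grading = entry
--     # bisect_right: number of thresholds that marks meets or exceeds
--     lo, hi = 0, len(thresholds)
--     while lo < hi: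
--         mid = (lo + hi) // 2
--         if marks >= thresholds[mid]:
--             lo = mid + 1
--         else:
--             hi = mid
--     grade = "F" if lo == 0 else grades[lo - 1]
--     return grading.get(grade, 0)
-- ===== Notes on version B (the rewrite author's own statement) =====
-- stated objective: alternative
-- what changed: Replaces the per-call sorted() + descending linear first-match scan with precomputed ascending threshold tables and a hand-written bisect_right binary search over them.
import Mathlib
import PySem

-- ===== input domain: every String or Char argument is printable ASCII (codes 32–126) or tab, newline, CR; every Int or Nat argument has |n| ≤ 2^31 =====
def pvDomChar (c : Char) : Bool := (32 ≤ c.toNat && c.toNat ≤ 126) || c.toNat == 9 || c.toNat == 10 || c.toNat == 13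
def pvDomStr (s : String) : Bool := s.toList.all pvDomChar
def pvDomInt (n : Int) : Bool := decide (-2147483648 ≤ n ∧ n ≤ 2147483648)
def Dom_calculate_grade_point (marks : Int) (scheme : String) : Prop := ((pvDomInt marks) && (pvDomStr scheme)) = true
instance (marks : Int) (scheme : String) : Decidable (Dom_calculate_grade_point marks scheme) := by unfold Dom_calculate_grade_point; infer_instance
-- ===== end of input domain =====

-- B replaces A's per-call sort + descending linear scan with precomputed ascending
-- threshold tables and a bisect_right-style binary search (objective: alternative).

-- ===== PORT A =====
structure VtuScheme where
  grading : PySem.Dict String Int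
  pattern : String
  marks_to_grade : PySem.Dict Int String
deriving Repr, DecidableEq

def pvGradingNew : PySem.Dict String Int :=
  PySem.Dict.ofList [("O", 10), ("A+", 9), ("A", 8), ("B+", 7), ("B", 6), ("C", 5), ("P", 4), ("F", 0)]
def pvGradingOld : PySem.Dict String Int :=
  PySem.Dict.ofList [("S", 10), ("A", 9), ("B", 8), ("C", 7), ("D", 6), ("E", 5), ("F", 0)]
def pvM2GNew : PySem.Dict Int String :=
  PySem.Dict.ofList [(90, "O"), (80, "A+"), (70, "A"), (60, "B+"), (55, "B"), (50, "C"), (40, "P")]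
def pvM2GOld : PySem.Dict Int String :=
  PySem.Dict.ofList [(90, "S"), (80, "A"), (70, "B"), (60, "C"), (50, "D"), (40, "E")]

def VTU_SCHEMES : PySem.Dict String VtuScheme :=
  PySem.Dict.ofList
    [ ("2024", ⟨pvGradingNew, "B[A-Z]{4}\\d{3}[A-Z]?", pvM2GNew⟩)
    , ("2022", ⟨pvGradingNew, "B[A-Z]{2}\\d{3}[A-Z]?", pvM2GNew⟩)
    , ("2021", ⟨pvGradingNew, "21[A-Z]{2,4}\\d{2,3}", pvM2GNew⟩)
    , ("2018", ⟨pvGradingOld, "18[A-Z]{2,4}\\d{2,3}", pvM2GOld⟩)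
    , ("2017", ⟨pvGradingOld, "17[A-Z]{2,4}\\d{2,3}", pvM2GOld⟩)
    , ("2015", ⟨pvGradingOld, "15[A-Z]{2,4}\\d{2,3}", pvM2GOld⟩) ]

-- the `for … if marks >= threshold: grade = …; break` loop (default "F")
def pvGradeLoop (marks : Int) : List (Int × String) → String
  | [] => "F"
  | (t, g) :: rest => if marks ≥ t then g else pvGradeLoop marks rest

def calculate_grade_point (marks : Int) (scheme : String) : Int :=
  match VTU_SCHEMES.get? scheme with
  | none => 0
  | some sch =>
    let items := PySem.List.sorted2 sch.marks_to_grade.items (·.1) (·.2) true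
    let grade := pvGradeLoop marks items
    sch.grading.getD grade 0

-- ===== PORT B =====
def pvGradingNewB : PySem.Dict String Int :=
  PySem.Dict.ofList [("O", 10), ("A+", 9), ("A", 8), ("B+", 7), ("B", 6), ("C", 5), ("P", 4), ("F", 0)]
def pvGradingOldB : PySem.Dict String Int :=
  PySem.Dict.ofList [("S", 10), ("A", 9), ("B", 8), ("C", 7), ("D", 6), ("E", 5), ("F", 0)]
def pvThrNew : List Int × List String :=
  ([40, 50, 55, 60, 70, 80, 90], ["P", "C", "B", "B+", "A", "A+", "O"])
def pvThrOld : List Int × List String :=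
  ([40, 50, 60, 70, 80, 90], ["E", "D", "C", "B", "A", "S"])

def pvTables : PySem.Dict String ((List Int × List String) × PySem.Dict String Int) :=
  PySem.Dict.ofList
    [ ("2024", (pvThrNew, pvGradingNewB))
    , ("2022", (pvThrNew, pvGradingNewB))
    , ("2021", (pvThrNew, pvGradingNewB))
    , ("2018", (pvThrOld, pvGradingOldB))
    , ("2017", (pvThrOld, pvGradingOldB))
    , ("2015", (pvThrOld, pvGradingOldB)) ]

-- the hand-written bisect_right loop of Source B (indices always in range, so getD is exact)
def pvBisectLoop (marks : Int) (thr : List Int) (lo hi : Nat) : Nat :=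
  if _h : lo < hi then
    let mid := (lo + hi) / 2
    if marks ≥ thr.getD mid 0 then pvBisectLoop marks thr (mid + 1) hi
    else pvBisectLoop marks thr lo mid
  else lo
termination_by hi - lo
decreasing_by all_goals omega

def calculate_grade_point_alt (marks : Int) (scheme : String) : Int :=
  match pvTables.get? scheme with
  | none => 0
  | some ((thresholds, grades), grading) =>
    let lo := pvBisectLoop marks thresholds 0 thresholds.length
    let grade := if lo = 0 then "F" else grades.getD (lo - 1) ""
    grading.getD grade 0

-- ===== PRECONDITION & SPEC =====
def Spec_calculate_grade_point (marks : Int) (scheme : String) (out : Int) : Prop := out = calculate_grade_point_alt marks scheme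
instance (marks : Int) (scheme : String) (out : Int) : Decidable (Spec_calculate_grade_point marks scheme out) := by unfold Spec_calculate_grade_point; infer_instance

-- ===== CLAIM (what is proved, stated in full; the proofs are below) =====
def Claim_equal_calculate_grade_point : Prop := ∀ (marks : Int) (scheme : String), Dom_calculate_grade_point marks scheme → Spec_calculate_grade_point marks scheme (calculate_grade_point marks scheme)

-- ===== LEMMAS AND PROOFS =====

-- A's result and B's result agree on the 2021/2022/2024 grade table, for every marks
theorem pv_new_eval (marks : Int) :
    pvGradingNew.getD (pvGradeLoop marks (PySem.List.sorted2 pvM2GNew.items (·.1) (·.2) true)) 0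
  = (let lo := pvBisectLoop marks pvThrNew.1 0 pvThrNew.1.length
     pvGradingNewB.getD (if lo = 0 then "F" else pvThrNew.2.getD (lo - 1) "") 0) := by
  have hs : PySem.List.sorted2 pvM2GNew.items (·.1) (·.2) true
      = [(90,"O"),(80,"A+"),(70,"A"),(60,"B+"),(55,"B"),(50,"C"),(40,"P")] := by decide
  rw [hs]
  by_cases h40 : marks ≥ 40 <;> by_cases h50 : marks ≥ 50 <;> by_cases h55 : marks ≥ 55 <;>
    by_cases h60 : marks ≥ 60 <;> by_cases h70 : marks ≥ 70 <;> by_cases h80 : marks ≥ 80 <;>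
    by_cases h90 : marks ≥ 90 <;>
    first
      | omega
      | (simp [pvBisectLoop, pvGradeLoop, pvThrNew, h40, h50, h55, h60, h70, h80, h90]; decide)

-- the same for the 2015/2017/2018 grade table
theorem pv_old_eval (marks : Int) :
    pvGradingOld.getD (pvGradeLoop marks (PySem.List.sorted2 pvM2GOld.items (·.1) (·.2) true)) 0
  = (let lo := pvBisectLoop marks pvThrOld.1 0 pvThrOld.1.length
     pvGradingOldB.getD (if lo = 0 then "F" else pvThrOld.2.getD (lo - 1) "") 0) := by
  have hs : PySem.List.sorted2 pvM2GOld.items (·.1) (·.2) true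
      = [(90,"S"),(80,"A"),(70,"B"),(60,"C"),(50,"D"),(40,"E")] := by decide
  rw [hs]
  by_cases h40 : marks ≥ 40 <;> by_cases h50 : marks ≥ 50 <;> by_cases h60 : marks ≥ 60 <;>
    by_cases h70 : marks ≥ 70 <;> by_cases h80 : marks ≥ 80 <;> by_cases h90 : marks ≥ 90 <;>
    first
      | omega
      | (simp [pvBisectLoop, pvGradeLoop, pvThrOld, h40, h50, h60, h70, h80, h90]; decide)

-- ===== VERDICT (by name: the statement is the Claim_ definition above) =====
theorem calculate_grade_point_spec : Claim_equal_calculate_grade_point := by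
  intro marks scheme _
  unfold Spec_calculate_grade_point calculate_grade_point calculate_grade_point_alt
  by_cases h24 : scheme = "2024"
  · subst h24; exact pv_new_eval marks
  by_cases h22 : scheme = "2022"
  · subst h22; exact pv_new_eval marks
  by_cases h21 : scheme = "2021"
  · subst h21; exact pv_new_eval marks
  by_cases h18 : scheme = "2018"
  · subst h18; exact pv_old_eval marks
  by_cases h17 : scheme = "2017"
  · subst h17; exact pv_old_eval marks
  by_cases h15 : scheme = "2015"
  · subst h15; exact pv_old_eval marks
  have hA : VTU_SCHEMES.get? scheme = none := by
    rw [PySem.Dict.get?_eq_none_iff_not_mem_keys]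
    have hk : VTU_SCHEMES.keys = ["2024", "2022", "2021", "2018", "2017", "2015"] := by decide
    rw [hk]; simp [h24, h22, h21, h18, h17, h15]
  have hB : pvTables.get? scheme = none := by
    rw [PySem.Dict.get?_eq_none_iff_not_mem_keys]
    have hk : pvTables.keys = ["2024", "2022", "2021", "2018", "2017", "2015"] := by decide
    rw [hk]; simp [h24, h22, h21, h18, h17, h15]
  rw [hA, hB]
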